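-- pv_equiv track=rewrite | github.com/EngiOptiQA/TopoFlow | flow_solver/mesh_generator.py | create_boundary_nodes
-- ===== SOURCE A (Python) =====
-- def create_boundary_nodes(n_nodes_for_width, n_nodes_for_height, coords):
--
--     boundary_nodes = {'left': [], 'bottom': [], 'right': [], 'top': []}
--
--     for i in range(n_nodes_for_width):
--         for j in range(n_nodes_for_height):
--             i_node = i*(n_nodes_for_height)+j
--             if i == 0:
--                 boundary_nodes['left'].append(i_node)
--             elif i == n_nodes_for_width-1:
--                 boundary_nodes['right'].append(i_node)
--             elif j == 0:
--                 boundary_nodes['bottom'].append(i_node)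
--             elif j == n_nodes_for_height-1:
--                  boundary_nodes['top'].append(i_node)
--
--     return boundary_nodes
-- ===== SOURCE B (Python) =====
-- def create_boundary_nodes(n_nodes_for_width, n_nodes_for_height, coords):
--     W, H = n_nodes_for_width, n_nodes_for_height
--     left = list(range(H)) if W > 0 else []
--     right = list(range((W - 1) * H, W * H)) if W > 1 else []
--     inner = range(1, W - 1)
--     bottom = [i * H for i in inner] if H > 0 else []
--     top = [i * H + H - 1 for i in inner] if H > 1 else []
--     return {'left': left, 'bottom': bottom, 'right': right, 'top': top}
-- ===== Notes on version B (the rewrite author's own statement) =====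
-- stated objective: faster
-- what changed: Replaces the W*H double loop that tests every grid node against four boundary conditions with direct per-side arithmetic enumeration (ranges/strided lists) of only the boundary nodes.
import Mathlib
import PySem

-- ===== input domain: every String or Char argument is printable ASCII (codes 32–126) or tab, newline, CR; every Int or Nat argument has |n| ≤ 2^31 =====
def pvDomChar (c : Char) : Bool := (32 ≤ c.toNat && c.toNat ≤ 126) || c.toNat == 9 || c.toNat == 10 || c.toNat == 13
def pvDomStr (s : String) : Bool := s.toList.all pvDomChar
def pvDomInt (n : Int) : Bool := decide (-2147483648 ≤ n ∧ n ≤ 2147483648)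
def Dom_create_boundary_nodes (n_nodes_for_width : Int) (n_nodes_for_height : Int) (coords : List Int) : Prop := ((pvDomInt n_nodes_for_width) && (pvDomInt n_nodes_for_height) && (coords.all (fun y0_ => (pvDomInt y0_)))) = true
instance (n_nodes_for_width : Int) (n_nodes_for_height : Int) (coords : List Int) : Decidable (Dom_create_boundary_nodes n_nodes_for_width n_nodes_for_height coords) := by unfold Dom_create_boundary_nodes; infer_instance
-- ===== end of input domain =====

-- B replaces A's W*H double loop (testing every node against the four boundary conditions)
-- with direct arithmetic enumeration of each side; asymptotically faster (O(W+H) vs O(W*H)).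

-- ===== PORT A =====
-- A's dict has the four fixed keys 'left','bottom','right','top' created once and only
-- appended to; it is represented as the 4-tuple of its value lists, assembled in key
-- insertion order at the end (exact: keys are never added or removed).
def create_boundary_nodes (n_nodes_for_width : Int) (n_nodes_for_height : Int) (coords : List Int) : List (String × List Int) :=
  let st := (PySem.List.pyRange 0 n_nodes_for_width 1).foldl (fun s i =>
      (PySem.List.pyRange 0 n_nodes_for_height 1).foldl
        (fun (s : List Int × List Int × List Int × List Int) j =>
          let i_node := i * n_nodes_for_height + j
          if i = 0 then (s.1 ++ [i_node], s.2.1, s.2.2.1, s.2.2.2)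
          else if i = n_nodes_for_width - 1 then (s.1, s.2.1, s.2.2.1 ++ [i_node], s.2.2.2)
          else if j = 0 then (s.1, s.2.1 ++ [i_node], s.2.2.1, s.2.2.2)
          else if j = n_nodes_for_height - 1 then (s.1, s.2.1, s.2.2.1, s.2.2.2 ++ [i_node])
          else s) s) ([], [], [], [])
  [("left", st.1), ("bottom", st.2.1), ("right", st.2.2.1), ("top", st.2.2.2)]

-- ===== PORT B =====
def create_boundary_nodes_alt (n_nodes_for_width : Int) (n_nodes_for_height : Int) (coords : List Int) : List (String × List Int) :=
  let left := if n_nodes_for_width > 0 then PySem.List.pyRange 0 n_nodes_for_height 1 else []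
  let right := if n_nodes_for_width > 1 then
      PySem.List.pyRange ((n_nodes_for_width - 1) * n_nodes_for_height)
        (n_nodes_for_width * n_nodes_for_height) 1 else []
  let inner := PySem.List.pyRange 1 (n_nodes_for_width - 1) 1
  let bottom := if n_nodes_for_height > 0 then inner.map (fun i => i * n_nodes_for_height) else []
  let top := if n_nodes_for_height > 1 then
      inner.map (fun i => i * n_nodes_for_height + n_nodes_for_height - 1) else []
  [("left", left), ("bottom", bottom), ("right", right), ("top", top)]

-- ===== PRECONDITION & SPEC =====
def Spec_create_boundary_nodes (n_nodes_for_width : Int) (n_nodes_for_height : Int) (coords : List Int) (out : List (String × List Int)) : Prop := out = create_boundary_nodes_alt n_nodes_for_width n_nodes_for_height coords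
instance (n_nodes_for_width : Int) (n_nodes_for_height : Int) (coords : List Int) (out : List (String × List Int)) : Decidable (Spec_create_boundary_nodes n_nodes_for_width n_nodes_for_height coords out) := by unfold Spec_create_boundary_nodes; infer_instance

-- ===== CLAIM (what is proved, stated in full; the proofs are below) =====
def Claim_equal_create_boundary_nodes : Prop := ∀ (n_nodes_for_width : Int) (n_nodes_for_height : Int) (coords : List Int), Dom_create_boundary_nodes n_nodes_for_width n_nodes_for_height coords → Spec_create_boundary_nodes n_nodes_for_width n_nodes_for_height coords (create_boundary_nodes n_nodes_for_width n_nodes_for_height coords)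

-- ===== LEMMAS AND PROOFS =====

-- state of A's loop and "append to each of the four lists" step
def app4 (s : List Int × List Int × List Int × List Int) (a b c d : List Int) :
    List Int × List Int × List Int × List Int :=
  (s.1 ++ a, s.2.1 ++ b, s.2.2.1 ++ c, s.2.2.2 ++ d)

theorem foldl_app4 {α : Type} (f g h k : α → List Int) (L : List α)
    (s : List Int × List Int × List Int × List Int) :
    L.foldl (fun s x => app4 s (f x) (g x) (h x) (k x)) s
      = app4 s (L.flatMap f) (L.flatMap g) (L.flatMap h) (L.flatMap k) := by
  induction L generalizing s with
  | nil => simp [app4]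
  | cons a t ih =>
    simp only [List.foldl_cons, List.flatMap_cons]
    rw [ih]
    simp [app4, List.append_assoc]

theorem flatMap_ite_single (L : List Int) (hnd : L.Nodup) (c : Int) (v : Int → List Int) :
    L.flatMap (fun x => if x = c then v x else []) = if c ∈ L then v c else [] := by
  induction L with
  | nil => simp
  | cons a t ih =>
    rcases List.nodup_cons.mp hnd with ⟨ha, ht⟩
    by_cases hac : a = c
    · subst hac
      simp [ha, ih ht]
    · simp [hac, ih ht, Ne.symm hac]

theorem flatMap_mid (W : Int) (v : Int → List Int) :
    (PySem.List.pyRange 0 W 1).flatMap (fun i => if i ≠ 0 ∧ i ≠ W - 1 then v i else [])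
      = (PySem.List.pyRange 1 (W - 1) 1).flatMap v := by
  by_cases hW2 : 2 ≤ W
  · rw [PySem.List.pyRange_one_append 0 1 W (by omega) (by omega),
        PySem.List.pyRange_one_append 1 (W - 1) W (by omega) (by omega)]
    have h01 : PySem.List.pyRange 0 1 1 = [0] := by decide
    have hlast : PySem.List.pyRange (W - 1) W 1 = [W - 1] := by
      rw [PySem.List.pyRange_one_cons (by omega), PySem.List.pyRange_one_eq_nil (by omega)]
    rw [h01, hlast]
    simp only [List.flatMap_append, List.flatMap_cons, List.flatMap_nil]
    have hmid : (PySem.List.pyRange 1 (W - 1) 1).flatMap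
        (fun i => if i ≠ 0 ∧ i ≠ W - 1 then v i else [])
        = (PySem.List.pyRange 1 (W - 1) 1).flatMap v := by
      unfold List.flatMap
      congr 1
      apply List.map_congr_left
      intro x hx
      have := PySem.List.mem_pyRange_one.mp hx
      have hx1 : x ≠ 0 := by omega
      have hx2 : x ≠ W - 1 := by omega
      simp [hx1, hx2]
    rw [hmid]
    simp
  · by_cases hW1 : W = 1
    · subst hW1
      have h01 : PySem.List.pyRange 0 1 1 = [0] := by decide
      rw [h01, PySem.List.pyRange_one_eq_nil (by omega)]
      simp
    · rw [PySem.List.pyRange_one_eq_nil (by omega), PySem.List.pyRange_one_eq_nil (by omega)]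
      simp

theorem create_boundary_nodes_eq (W H : Int) (coords : List Int) :
    create_boundary_nodes W H coords = create_boundary_nodes_alt W H coords := by
  unfold create_boundary_nodes create_boundary_nodes_alt
  set I := PySem.List.pyRange 0 W 1 with hI
  set J := PySem.List.pyRange 0 H 1 with hJ
  -- rewrite the inner loop body as an app4 step
  have hinner : ∀ (i : Int) (s : List Int × List Int × List Int × List Int),
      J.foldl (fun (s : List Int × List Int × List Int × List Int) j =>
          let i_node := i * H + j
          if i = 0 then (s.1 ++ [i_node], s.2.1, s.2.2.1, s.2.2.2)
          else if i = W - 1 then (s.1, s.2.1, s.2.2.1 ++ [i_node], s.2.2.2)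
          else if j = 0 then (s.1, s.2.1 ++ [i_node], s.2.2.1, s.2.2.2)
          else if j = H - 1 then (s.1, s.2.1, s.2.2.1, s.2.2.2 ++ [i_node])
          else s) s
      = app4 s
          (J.flatMap (fun j => if i = 0 then [i * H + j] else []))
          (J.flatMap (fun j => if i ≠ 0 ∧ i ≠ W - 1 ∧ j = 0 then [i * H + j] else []))
          (J.flatMap (fun j => if i ≠ 0 ∧ i = W - 1 then [i * H + j] else []))
          (J.flatMap (fun j => if i ≠ 0 ∧ i ≠ W - 1 ∧ j ≠ 0 ∧ j = H - 1 then [i * H + j] else [])) := by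
    intro i s
    rw [show (fun (s : List Int × List Int × List Int × List Int) j =>
          let i_node := i * H + j
          if i = 0 then (s.1 ++ [i_node], s.2.1, s.2.2.1, s.2.2.2)
          else if i = W - 1 then (s.1, s.2.1, s.2.2.1 ++ [i_node], s.2.2.2)
          else if j = 0 then (s.1, s.2.1 ++ [i_node], s.2.2.1, s.2.2.2)
          else if j = H - 1 then (s.1, s.2.1, s.2.2.1, s.2.2.2 ++ [i_node])
          else s)
        = (fun s j => app4 s
            (if i = 0 then [i * H + j] else [])
            (if i ≠ 0 ∧ i ≠ W - 1 ∧ j = 0 then [i * H + j] else [])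
            (if i ≠ 0 ∧ i = W - 1 then [i * H + j] else [])
            (if i ≠ 0 ∧ i ≠ W - 1 ∧ j ≠ 0 ∧ j = H - 1 then [i * H + j] else [])) from by
      funext s j
      simp only [app4]
      split_ifs with h1 h2 h3 h4 <;> simp_all <;> tauto]
    exact foldl_app4 _ _ _ _ J s
  -- turn the whole double loop into four flatMaps
  have hfold :
      I.foldl (fun s i =>
        J.foldl (fun (s : List Int × List Int × List Int × List Int) j =>
          let i_node := i * H + j
          if i = 0 then (s.1 ++ [i_node], s.2.1, s.2.2.1, s.2.2.2)
          else if i = W - 1 then (s.1, s.2.1, s.2.2.1 ++ [i_node], s.2.2.2)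
          else if j = 0 then (s.1, s.2.1 ++ [i_node], s.2.2.1, s.2.2.2)
          else if j = H - 1 then (s.1, s.2.1, s.2.2.1, s.2.2.2 ++ [i_node])
          else s) s) ([], [], [], [])
      = app4 ([], [], [], [])
          (I.flatMap (fun i => J.flatMap (fun j => if i = 0 then [i * H + j] else [])))
          (I.flatMap (fun i => J.flatMap (fun j => if i ≠ 0 ∧ i ≠ W - 1 ∧ j = 0 then [i * H + j] else [])))
          (I.flatMap (fun i => J.flatMap (fun j => if i ≠ 0 ∧ i = W - 1 then [i * H + j] else [])))
          (I.flatMap (fun i => J.flatMap (fun j => if i ≠ 0 ∧ i ≠ W - 1 ∧ j ≠ 0 ∧ j = H - 1 then [i * H + j] else []))) := by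
    rw [show (fun (s : List Int × List Int × List Int × List Int) i =>
        J.foldl (fun (s : List Int × List Int × List Int × List Int) j =>
          let i_node := i * H + j
          if i = 0 then (s.1 ++ [i_node], s.2.1, s.2.2.1, s.2.2.2)
          else if i = W - 1 then (s.1, s.2.1, s.2.2.1 ++ [i_node], s.2.2.2)
          else if j = 0 then (s.1, s.2.1 ++ [i_node], s.2.2.1, s.2.2.2)
          else if j = H - 1 then (s.1, s.2.1, s.2.2.1, s.2.2.2 ++ [i_node])
          else s) s)
      = (fun s i => app4 s
          (J.flatMap (fun j => if i = 0 then [i * H + j] else []))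
          (J.flatMap (fun j => if i ≠ 0 ∧ i ≠ W - 1 ∧ j = 0 then [i * H + j] else []))
          (J.flatMap (fun j => if i ≠ 0 ∧ i = W - 1 then [i * H + j] else []))
          (J.flatMap (fun j => if i ≠ 0 ∧ i ≠ W - 1 ∧ j ≠ 0 ∧ j = H - 1 then [i * H + j] else []))) from by
      funext s i; exact hinner i s]
    exact foldl_app4 _ _ _ _ I _
  rw [hfold]
  -- LEFT
  have hleft : I.flatMap (fun i => J.flatMap (fun j => if i = 0 then [i * H + j] else []))
      = (if W > 0 then J else []) := by
    have h1 : (fun i => J.flatMap (fun j => if i = 0 then [i * H + j] else []))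
        = (fun i => if i = 0 then J.flatMap (fun j => [i * H + j]) else []) := by
      funext i; by_cases hi : i = 0 <;> simp [hi]
    rw [h1, flatMap_ite_single I (hI ▸ PySem.List.nodup_pyRange_one 0 W) 0]
    have h0 : (0 : Int) ∈ I ↔ W > 0 := by
      rw [hI, PySem.List.mem_pyRange_one]; omega
    by_cases hw : W > 0
    · rw [if_pos (h0.mpr hw), if_pos hw]
      simp [List.flatMap_singleton']
    · rw [if_neg (fun h => hw (h0.mp h)), if_neg hw]
  -- RIGHT
  have hright : I.flatMap (fun i => J.flatMap (fun j => if i ≠ 0 ∧ i = W - 1 then [i * H + j] else []))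
      = (if W > 1 then PySem.List.pyRange ((W - 1) * H) (W * H) 1 else []) := by
    have h1 : (fun i => J.flatMap (fun j => if i ≠ 0 ∧ i = W - 1 then [i * H + j] else []))
        = (fun i => if i = W - 1 then (if i = 0 then [] else J.map (fun j => i * H + j)) else []) := by
      funext i
      by_cases h2 : i = W - 1
      · subst h2
        by_cases h3 : (W - 1 : Int) = 0
        · simp [h3]
        · simp [h3, ← List.map_eq_flatMap]
      · simp [h2]
    rw [h1, flatMap_ite_single I (hI ▸ PySem.List.nodup_pyRange_one 0 W) (W - 1)]
    have h0 : (W - 1 : Int) ∈ I ↔ W ≥ 1 := by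
      rw [hI, PySem.List.mem_pyRange_one]; omega
    by_cases hw : W > 1
    · rw [if_pos (h0.mpr (by omega)), if_neg (by omega : ¬ (W - 1 : Int) = 0), if_pos hw,
          hJ, PySem.List.pyRange_one, PySem.List.pyRange_one]
      have he : (W * H - (W - 1) * H) = H := by ring
      rw [he, List.map_map]
      simp only [sub_zero]
      apply List.map_congr_left
      intro k _
      simp only [Function.comp_apply, zero_add]
    · by_cases hw1 : W = 1
      · subst hw1
        rw [if_pos (h0.mpr (by omega))]
        norm_num
      · rw [if_neg (fun h => (by omega : ¬ W ≥ 1) (h0.mp h)), if_neg hw]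
  -- BOTTOM
  have hbottom : I.flatMap (fun i => J.flatMap (fun j => if i ≠ 0 ∧ i ≠ W - 1 ∧ j = 0 then [i * H + j] else []))
      = (if H > 0 then (PySem.List.pyRange 1 (W - 1) 1).map (fun i => i * H) else []) := by
    have h1 : (fun i => J.flatMap (fun j => if i ≠ 0 ∧ i ≠ W - 1 ∧ j = 0 then [i * H + j] else []))
        = (fun i => if i ≠ 0 ∧ i ≠ W - 1 then (if H > 0 then [i * H] else []) else []) := by
      funext i
      by_cases hc : i ≠ 0 ∧ i ≠ W - 1
      · have h2 : (fun j => if i ≠ 0 ∧ i ≠ W - 1 ∧ j = 0 then [i * H + j] else [])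
            = (fun j => if j = (0 : Int) then [i * H + j] else []) := by
          funext j; by_cases hj : j = 0 <;> simp [hj, hc.1, hc.2]
        rw [if_pos hc, h2, flatMap_ite_single J (hJ ▸ PySem.List.nodup_pyRange_one 0 H) 0]
        have h0 : (0 : Int) ∈ J ↔ H > 0 := by
          rw [hJ, PySem.List.mem_pyRange_one]; omega
        by_cases hh : H > 0
        · rw [if_pos (h0.mpr hh), if_pos hh]
          simp
        · rw [if_neg (fun h => hh (h0.mp h)), if_neg hh]
      · have h2 : (fun j => if i ≠ 0 ∧ i ≠ W - 1 ∧ j = 0 then [i * H + j] else [])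
            = (fun (_ : Int) => ([] : List Int)) := by
          funext j; simp only [ite_eq_right_iff]; intro h; exact absurd ⟨h.1, h.2.1⟩ hc
        rw [if_neg hc, h2]
        simp
    rw [h1, hI, flatMap_mid]
    by_cases hh : H > 0
    · have h3 : (fun i : Int => if H > 0 then [i * H] else []) = (fun i : Int => [i * H]) := by
        funext i; rw [if_pos hh]
      rw [if_pos hh, h3, ← List.map_eq_flatMap]
    · have h3 : (fun i : Int => if H > 0 then [i * H] else []) = (fun (_ : Int) => ([] : List Int)) := by
        funext i; rw [if_neg hh]
      rw [if_neg hh, h3]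
      simp
  -- TOP
  have htop : I.flatMap (fun i => J.flatMap (fun j => if i ≠ 0 ∧ i ≠ W - 1 ∧ j ≠ 0 ∧ j = H - 1 then [i * H + j] else []))
      = (if H > 1 then (PySem.List.pyRange 1 (W - 1) 1).map (fun i => i * H + H - 1) else []) := by
    have h1 : (fun i => J.flatMap (fun j => if i ≠ 0 ∧ i ≠ W - 1 ∧ j ≠ 0 ∧ j = H - 1 then [i * H + j] else []))
        = (fun i => if i ≠ 0 ∧ i ≠ W - 1 then (if H > 1 then [i * H + H - 1] else []) else []) := by
      funext i
      by_cases hc : i ≠ 0 ∧ i ≠ W - 1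
      · have h2 : (fun j => if i ≠ 0 ∧ i ≠ W - 1 ∧ j ≠ 0 ∧ j = H - 1 then [i * H + j] else [])
            = (fun j => if j = (H - 1 : Int) then (if H - 1 = 0 then [] else [i * H + j]) else []) := by
          funext j
          by_cases hj : j = H - 1
          · by_cases hj0 : j = 0 <;> simp [hj, hj0, hc.1, hc.2] <;> omega
          · simp [hj]
        rw [if_pos hc, h2, flatMap_ite_single J (hJ ▸ PySem.List.nodup_pyRange_one 0 H) (H - 1)]
        have h0 : (H - 1 : Int) ∈ J ↔ H ≥ 1 := by
          rw [hJ, PySem.List.mem_pyRange_one]; omega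
        by_cases hh : H > 1
        · rw [if_pos (h0.mpr (by omega)), if_neg (by omega : ¬ (H - 1 : Int) = 0), if_pos hh]
          have harr : i * H + (H - 1) = i * H + H - 1 := by ring
          rw [harr]
        · by_cases hh1 : H = 1
          · subst hh1
            rw [if_pos (h0.mpr (by omega))]
            norm_num
          · rw [if_neg (fun h => (by omega : ¬ H ≥ 1) (h0.mp h)), if_neg hh]
      · have h2 : (fun j => if i ≠ 0 ∧ i ≠ W - 1 ∧ j ≠ 0 ∧ j = H - 1 then [i * H + j] else [])
            = (fun (_ : Int) => ([] : List Int)) := by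
          funext j; simp only [ite_eq_right_iff]; intro h; exact absurd ⟨h.1, h.2.1⟩ hc
        rw [if_neg hc, h2]
        simp
    rw [h1, hI, flatMap_mid]
    by_cases hh : H > 1
    · have h3 : (fun i : Int => if H > 1 then [i * H + H - 1] else []) = (fun i : Int => [i * H + H - 1]) := by
        funext i; rw [if_pos hh]
      rw [if_pos hh, h3, ← List.map_eq_flatMap]
    · have h3 : (fun i : Int => if H > 1 then [i * H + H - 1] else []) = (fun (_ : Int) => ([] : List Int)) := by
        funext i; rw [if_neg hh]
      rw [if_neg hh, h3]
      simp
  rw [hleft, hright, hbottom, htop]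
  simp [app4]

-- ===== VERDICT (by name: the statement is the Claim_ definition above) =====
theorem create_boundary_nodes_spec : Claim_equal_create_boundary_nodes := by
  intro W H coords _
  exact create_boundary_nodes_eq W H coords
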